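-- pv_equiv track=rewrite | github.com/JoaoPedroSilvaLopes/projeto_logica_para_computacao | semanticsTESTE.py | pegarAtomica
-- ===== SOURCE A (Python) =====
-- def pegarAtomica(formulaCNF):
--
--     listaAtomicas = []
--
--     for clausula in formulaCNF:
--         for literal in clausula:
--             if literal > 0:
--                 listaAtomicas.append(literal)
--
--     if list(set(listaAtomicas)) != []:
--         return listaAtomicas.pop()
--
--     return
-- ===== SOURCE B (Python) =====
-- def pegarAtomica(formulaCNF):
--     for clausula in reversed(list(formulaCNF)):
--         for literal in reversed(list(clausula)):
--             if literal > 0: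
--                 return literal
--     return None
-- ===== Notes on version B (the rewrite author's own statement) =====
-- stated objective: simpler
-- what changed: Instead of collecting every positive literal into a list and popping the last, B scans the clauses and their literals in reverse and returns the first positive literal it meets (the last one in forward order), with no intermediate list and early exit.
import Mathlib
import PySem

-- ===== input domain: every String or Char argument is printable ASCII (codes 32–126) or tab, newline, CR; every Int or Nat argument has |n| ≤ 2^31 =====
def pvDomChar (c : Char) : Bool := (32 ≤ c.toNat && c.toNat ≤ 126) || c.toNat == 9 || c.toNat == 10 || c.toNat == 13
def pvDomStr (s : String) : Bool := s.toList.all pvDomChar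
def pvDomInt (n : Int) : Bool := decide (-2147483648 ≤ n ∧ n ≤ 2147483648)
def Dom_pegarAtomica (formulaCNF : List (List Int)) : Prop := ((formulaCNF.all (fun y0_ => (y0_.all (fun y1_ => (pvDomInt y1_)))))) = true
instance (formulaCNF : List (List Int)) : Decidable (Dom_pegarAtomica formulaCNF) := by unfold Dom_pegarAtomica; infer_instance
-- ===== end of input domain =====

-- B replaces 'collect all positive literals, then pop the last' by a reverse scan that
-- returns the first positive literal found (objective: simpler, no intermediate list).

-- ===== PORT A =====
-- nested for-loops appending positive literals; then 'if list(set(lista)) != []: return lista.pop()'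
-- (pop() on a list known nonempty returns its last element → getLast?)
def pegarAtomica (formulaCNF : List (List Int)) : Option Int :=
  let listaAtomicas :=
    formulaCNF.foldl
      (fun acc clausula =>
        clausula.foldl (fun acc2 literal => if literal > 0 then acc2 ++ [literal] else acc2) acc)
      []
  if PySem.Set.ofList listaAtomicas ≠ [] then listaAtomicas.getLast? else none

-- ===== PORT B =====
-- inner reverse loop: first literal > 0 in the (already reversed) clause
def goClause : List Int → Option Int
  | [] => none
  | literal :: rest => if literal > 0 then some literal else goClause rest

-- outer reverse loop over (already reversed) clause list
def goFormula : List (List Int) → Option Int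
  | [] => none
  | clausula :: rest =>
    match goClause clausula.reverse with
    | some x => some x
    | none => goFormula rest

def pegarAtomica_alt (formulaCNF : List (List Int)) : Option Int :=
  goFormula formulaCNF.reverse

-- ===== PRECONDITION & SPEC =====
def Spec_pegarAtomica (formulaCNF : List (List Int)) (out : Option Int) : Prop := out = pegarAtomica_alt formulaCNF
instance (formulaCNF : List (List Int)) (out : Option Int) : Decidable (Spec_pegarAtomica formulaCNF out) := by unfold Spec_pegarAtomica; infer_instance

-- ===== CLAIM (what is proved, stated in full; the proofs are below) =====
def Claim_equal_pegarAtomica : Prop := ∀ (formulaCNF : List (List Int)), Dom_pegarAtomica formulaCNF → Spec_pegarAtomica formulaCNF (pegarAtomica formulaCNF)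

-- ===== LEMMAS AND PROOFS =====

theorem inner_foldl (cl : List Int) (acc : List Int) :
    cl.foldl (fun acc2 literal => if literal > 0 then acc2 ++ [literal] else acc2) acc
      = acc ++ cl.filter (fun l => decide (l > 0)) := by
  induction cl generalizing acc with
  | nil => simp
  | cons x t ih =>
    simp only [List.foldl_cons, List.filter_cons]
    by_cases h : x > 0 <;> simp [h, ih]

theorem outer_foldl (f : List (List Int)) (acc : List Int) :
    f.foldl
      (fun acc clausula =>
        clausula.foldl (fun acc2 literal => if literal > 0 then acc2 ++ [literal] else acc2) acc)
      acc
      = acc ++ f.flatMap (fun c => c.filter (fun l => decide (l > 0))) := by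
  induction f generalizing acc with
  | nil => simp
  | cons c t ih => simp [inner_foldl, ih, List.flatMap]

theorem goClause_eq (l : List Int) :
    goClause l = (l.filter (fun x => decide (x > 0))).head? := by
  induction l with
  | nil => rfl
  | cons x t ih =>
    by_cases h : x > 0 <;> simp [goClause, h, ih]

theorem goFormula_eq (rs : List (List Int)) :
    goFormula rs = (rs.flatMap (fun c => (c.filter (fun l => decide (l > 0))).reverse)).head? := by
  induction rs with
  | nil => rfl
  | cons c t ih =>
    simp only [goFormula, goClause_eq, List.flatMap_cons, List.head?_append, ← List.filter_reverse]
    cases h : ((c.reverse.filter (fun l => decide (l > 0))).head?) <;> simp [h, ih]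

theorem alt_eq (f : List (List Int)) :
    pegarAtomica_alt f = (f.flatMap (fun c => c.filter (fun l => decide (l > 0)))).getLast? := by
  unfold pegarAtomica_alt
  rw [goFormula_eq, show (fun c : List Int => (c.filter (fun l => decide (l > 0))).reverse) = (List.reverse ∘ fun c : List Int => c.filter (fun l => decide (l > 0))) from rfl,
    ← List.reverse_flatMap, List.head?_reverse]

theorem ofList_ne_nil {L : List Int} (h : L ≠ []) : PySem.Set.ofList L ≠ [] := by
  intro hn
  cases L with
  | nil => exact h rfl
  | cons x t =>
    have hx : x ∈ PySem.Set.ofList (x :: t) := by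
      rw [PySem.Set.mem_ofList]; exact List.mem_cons_self
    rw [hn] at hx
    exact absurd hx (List.not_mem_nil)

-- ===== VERDICT (by name: the statement is the Claim_ definition above) =====
theorem pegarAtomica_spec : Claim_equal_pegarAtomica := by
  intro f _
  unfold Spec_pegarAtomica pegarAtomica
  rw [alt_eq]
  simp only [outer_foldl, List.nil_append]
  set L := f.flatMap (fun c => c.filter (fun l => decide (l > 0))) with hL
  by_cases h : L = []
  · simp [h]
  · simp [ofList_ne_nil h]
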